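-- pv_equiv track=rewrite | github.com/ismpere/Python-Examples | Práctica 2/python-practice.py | encuentra_maximo
-- ===== SOURCE A (Python) =====
-- def to_matriz(lista, fIni, cIni, dim):
--     # Inicializamos la matriz
--     matriz = []
--     for i in range(fIni, fIni+dim):
--         matriz.append([])
--         for j in range(cIni, cIni+dim):
--             matriz[i-fIni].append(None)
--             matriz[i-fIni][j-cIni] = lista[i][j]
--
--     return matriz
--
-- def tres_maximos(lista):
--     if len(lista)<4:
--         return lista
--     else:
--         return lista[0:3]
--
-- def quick_sort(array):
--     less = []
--     equal = []
--     greater = []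
--
--     if len(array) > 1:
--         # Elijo el pivote como el elemento central del array
--         pivot = array[len(array)//2]
--
--         # Divido el array entre los menos, iguales y mayores que el pivote
--         for x in array:
--             if x < pivot:
--                 less.append(x)
--             if x == pivot:
--                 equal.append(x)
--             if x > pivot:
--                 greater.append(x)
--
--         # Devuelvo la concatenacion de los arrays ordenador greater + equal + less
--         return quick_sort(greater)+equal+quick_sort(less)
--     else:
--         return array
--
-- def encuentra_submaximos(matriz):
--     impares = []
--
--     # Extraigo los mayores elementos de las filas
--     for i in range(len(matriz)):
--         n = int(''.join(str(j) for j in matriz[i])) # Paso los elementos de la fila a un entero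
--
--         n_invertido = int(str(n)[::-1]) # Invierto el numero que acabo de sacar de la fila, ya que es tambien una posible solucion
--
--         if n%2 != 0:
--             impares.append(n)
--         if n_invertido%2 != 0:
--             impares.append(n_invertido)
--
--     # Extraigo los mayores elementos de las columnas
--     for j in range(len(matriz)):
--         aux = []
--         for i in range(len(matriz)):
--             aux.append(matriz[i][j])
--
--         n = int(''.join(str(j) for j in aux)) # Paso los elementos de la columna a un entero
--
--         n_invertido = int(str(n)[::-1]) # Invierto el numero que acabo de sacar de la columna, ya que es tambien una posible solucion
--
--         if n%2 != 0:
--             impares.append(n)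
--         if n_invertido%2 != 0:
--             impares.append(n_invertido)
--
--     # Ordeno los elementos encontrados
--     impares_ordenados = quick_sort(impares)
--     # Devuelvo los 3 mayores elementos, o en su defecto de que no haya 3, los que haya
--     return tres_maximos(impares_ordenados)
--
-- def encuentra_maximo(sopa):
--     maximos = []
--     for k in range (3):
--         maximosAux = []
--         for i in range(k+1):
--             for j in range(k+1): # Recorro todos los posibles bloques que se pueden formar para cada dimension
--                 matriz = to_matriz(sopa,i,j,len(sopa)-k)
--                 maximosAux.extend(encuentra_submaximos(matriz))
--         maximosAux = list(set(maximosAux)) #Elimino los duplicados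
--         maximos.append(tuple(tres_maximos(quick_sort(maximosAux))))
--
--     return tuple(maximos)
-- ===== SOURCE B (Python) =====
-- def encuentra_maximo(sopa):
--     n = len(sopa)
--     res = []
--     for k in range(3):
--         d = n - k
--         best = []  # distinct top-3 so far for this k, kept in descending order
--         for i in range(k + 1):
--             for j in range(k + 1):
--                 top = []  # this block's top-3 (with duplicates), descending
--                 for idx in range(2 * d):
--                     if idx < d:  # row idx of the block
--                         digits = (sopa[i + idx][j + c] for c in range(d))
--                     else:        # column idx-d of the block
--                         digits = (sopa[i + r][j + idx - d] for r in range(d))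
--                     v = int(''.join(str(x) for x in digits))
--                     w = int(str(v)[::-1])
--                     cands = ([v] if v % 2 != 0 else []) + ([w] if w % 2 != 0 else [])
--                     for cand in cands:
--                         p = 0
--                         while p < len(top) and top[p] >= cand:
--                             p += 1
--                         top.insert(p, cand)
--                         del top[3:]
--                 for x in top:
--                     if x not in best:
--                         p = 0
--                         while p < len(best) and best[p] >= x:
--                             p += 1
--                         best.insert(p, x)
--                         del best[3:]
--         res.append(tuple(best))
--     return tuple(res)
-- ===== Notes on version B (the rewrite author's own statement) =====
-- stated objective: alternative
-- what changed: B never sorts and never builds a set: every odd row/column value (read straight off sopa by index arithmetic in one interleaved row/column loop per block, instead of A's to_matriz copy) is pushed through an online bounded-insertion buffer — a <=3-element descending list per block, and a <=3-element distinct descending list per dimension — replacing A's quick_sort + tres_maximos + list(set(...)) pipeline by streaming selection.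
-- outside the precondition, e.g. on encuentra_maximo([[1, -2], [3, 4]]): A raises ValueError, B raises ValueError; on encuentra_maximo([[1], [2]]): A raises IndexError, B raises IndexError
import Mathlib
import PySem

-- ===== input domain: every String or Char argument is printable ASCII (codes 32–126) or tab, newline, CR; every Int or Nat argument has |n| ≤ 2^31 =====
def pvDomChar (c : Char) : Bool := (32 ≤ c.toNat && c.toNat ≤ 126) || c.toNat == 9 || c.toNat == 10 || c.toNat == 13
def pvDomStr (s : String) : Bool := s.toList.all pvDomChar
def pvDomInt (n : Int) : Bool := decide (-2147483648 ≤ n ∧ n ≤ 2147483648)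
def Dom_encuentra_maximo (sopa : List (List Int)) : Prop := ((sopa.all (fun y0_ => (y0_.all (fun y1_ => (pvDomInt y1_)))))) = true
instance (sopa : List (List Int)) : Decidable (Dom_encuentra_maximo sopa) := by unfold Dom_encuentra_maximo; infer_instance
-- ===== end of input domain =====

-- B replaces A's sort-then-slice pipeline (quick_sort + tres_maximos + list(set(..)))
-- by online bounded selection: each candidate is inserted into a ≤3-element descending
-- buffer (per block with duplicates, per dimension distinct), so nothing is ever sorted
-- or materialised as a set; rows and columns of a block are produced by one index loop.

-- ===== PORT A =====

-- used only by quick_sort's termination argument (cited in decreasing_by)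
lemma qs_part (pivot : Int) (l : List Int) (a b c : List Int) :
    l.foldl (fun (acc : List Int × List Int × List Int) x =>
        (if x < pivot then acc.1 ++ [x] else acc.1,
         if x = pivot then acc.2.1 ++ [x] else acc.2.1,
         if pivot < x then acc.2.2 ++ [x] else acc.2.2)) (a, b, c)
    = (a ++ l.filter (fun x => decide (x < pivot)),
       b ++ l.filter (fun x => decide (x = pivot)),
       c ++ l.filter (fun x => decide (pivot < x))) := by
  induction l generalizing a b c with
  | nil => simp
  | cons x t ih =>
    simp only [List.foldl_cons, List.filter_cons, ih]
    rcases lt_trichotomy x pivot with h | h | h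
    · simp [h, ne_of_lt h, not_lt.mpr (le_of_lt h)]
    · simp [h]
    · simp [not_lt.mpr (le_of_lt h), (ne_of_lt h).symm, h]

-- used only by quick_sort's termination argument (cited in decreasing_by)
lemma qs_pivot_mem (l : List Int) (h : 1 < l.length) :
    PySem.List.pyGetD l (PySem.Int.floordiv ((l.length : Int)) 2) 0 ∈ l := by
  have h2 : PySem.Int.floordiv ((l.length : Int)) 2 = ((l.length / 2 : Nat) : Int) := by
    exact_mod_cast PySem.Int.floordiv_natCast l.length 2
  rw [h2, PySem.List.pyGetD_natCast]
  have hlt : l.length / 2 < l.length := Nat.div_lt_self (by omega) (by omega)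
  rw [List.getD_eq_getElem l 0 hlt]
  exact List.getElem_mem hlt

-- used only by quick_sort's termination argument (cited in decreasing_by)
lemma qs_filter_lt {p : Int} {l : List Int} (h : p ∈ l) :
    (l.filter (fun x => decide (p < x))).length < l.length ∧
    (l.filter (fun x => decide (x < p))).length < l.length :=
  ⟨List.length_filter_lt_length_iff_exists.mpr ⟨p, h, by simp⟩,
   List.length_filter_lt_length_iff_exists.mpr ⟨p, h, by simp⟩⟩

-- the partition loop of quick_sort: the three 'if' appends of the Python loop, as one pass
-- over the triple (less, equal, greater)
def qs_split (pivot : Int) (array : List Int) : List Int × List Int × List Int :=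
  array.foldl (fun (acc : List Int × List Int × List Int) x =>
      (if x < pivot then acc.1 ++ [x] else acc.1,
       if x = pivot then acc.2.1 ++ [x] else acc.2.1,
       if pivot < x then acc.2.2 ++ [x] else acc.2.2)) ([], [], [])

-- characterisation of qs_split, cited by quick_sort's decreasing_by and by the proofs below
lemma qs_split_eq (pivot : Int) (l : List Int) :
    qs_split pivot l
    = (l.filter (fun x => decide (x < pivot)),
       l.filter (fun x => decide (x = pivot)),
       l.filter (fun x => decide (pivot < x))) := by
  simpa using qs_part pivot l [] [] []

def quick_sort (array : List Int) : List Int :=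
  if h : 1 < array.length then
    let pivot := PySem.List.pyGetD array (PySem.Int.floordiv ((array.length : Int)) 2) 0
    let p := qs_split pivot array
    quick_sort p.2.2 ++ p.2.1 ++ quick_sort p.1
  else array
termination_by array.length
decreasing_by
  · simp only [qs_split_eq]
    exact (qs_filter_lt (qs_pivot_mem array h)).1
  · simp only [qs_split_eq]
    exact (qs_filter_lt (qs_pivot_mem array h)).2

def tres_maximos (lista : List Int) : List Int :=
  if lista.length < 4 then lista else PySem.List.slice lista (some 0) (some 3)

-- 'matriz[i-fIni].append(None); matriz[i-fIni][j-cIni] = lista[i][j]' appends None to the last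
-- row and immediately overwrites that same slot: ported as appending the value itself.
def to_matriz (lista : List (List Int)) (fIni cIni dim : Int) : List (List Int) :=
  (PySem.List.pyRange fIni (fIni + dim) 1).foldl
    (fun matriz i =>
      matriz ++ [(PySem.List.pyRange cIni (cIni + dim) 1).foldl
        (fun fila j => fila ++ [PySem.List.pyGetD (PySem.List.pyGetD lista i []) j 0]) []])
    []

-- int(...) raising (ValueError) is 'none': defaulted with .getD, excluded by Pre_;
-- str(n)[::-1] (step -1) never raises, its slice? is defaulted likewise.
def encuentra_submaximos (matriz : List (List Int)) : List Int :=
  let impares := (PySem.List.pyRange 0 ((matriz.length : Int)) 1).foldl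
    (fun impares i =>
      let n := (PySem.Int.ofStr? (PySem.Str.join "" ((PySem.List.pyGetD matriz i []).map PySem.Int.toStr))).getD 0
      let n_invertido := (PySem.Int.ofStr? ((PySem.Str.slice? (PySem.Int.toStr n) none none (-1)).getD "")).getD 0
      let impares := if PySem.Int.mod n 2 ≠ 0 then impares ++ [n] else impares
      if PySem.Int.mod n_invertido 2 ≠ 0 then impares ++ [n_invertido] else impares)
    []
  let impares := (PySem.List.pyRange 0 ((matriz.length : Int)) 1).foldl
    (fun impares j =>
      let aux := (PySem.List.pyRange 0 ((matriz.length : Int)) 1).foldl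
        (fun aux i => aux ++ [PySem.List.pyGetD (PySem.List.pyGetD matriz i []) j 0]) []
      let n := (PySem.Int.ofStr? (PySem.Str.join "" (aux.map PySem.Int.toStr))).getD 0
      let n_invertido := (PySem.Int.ofStr? ((PySem.Str.slice? (PySem.Int.toStr n) none none (-1)).getD "")).getD 0
      let impares := if PySem.Int.mod n 2 ≠ 0 then impares ++ [n] else impares
      if PySem.Int.mod n_invertido 2 ≠ 0 then impares ++ [n_invertido] else impares)
    impares
  tres_maximos (quick_sort impares)

-- list(set(xs)) is ported as PySem.Set.ofList; its order is only consumed by quick_sort,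
-- whose output is order-independent (a descending sort), so the port is exact.
def encuentra_maximo (sopa : List (List Int)) : List (List Int) :=
  (PySem.List.pyRange 0 3 1).foldl
    (fun maximos k =>
      let maximosAux := (PySem.List.pyRange 0 (k + 1) 1).foldl
        (fun mAux i =>
          (PySem.List.pyRange 0 (k + 1) 1).foldl
            (fun mAux j => mAux ++ encuentra_submaximos (to_matriz sopa i j ((sopa.length : Int) - k)))
            mAux)
        []
      let maximosAux := PySem.Set.ofList maximosAux
      maximos ++ [tres_maximos (quick_sort maximosAux)])
    []

-- ===== PORT B =====

-- Source B's while-loop insertion point: descending insert (after equal elements);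
-- 'top.insert(p, cand); del top[3:]' is '(insDesc cand top).take 3'
def insDesc (x : Int) : List Int → List Int
  | [] => [x]
  | a :: t => if x ≤ a then a :: insDesc x t else x :: a :: t

def encuentra_maximo_alt (sopa : List (List Int)) : List (List Int) :=
  let n : Int := (sopa.length : Int)
  (PySem.List.pyRange 0 3 1).foldl
    (fun res k =>
      let d := n - k
      let best := (PySem.List.pyRange 0 (k + 1) 1).foldl
        (fun best i =>
          (PySem.List.pyRange 0 (k + 1) 1).foldl
            (fun best j =>
              let top := (PySem.List.pyRange 0 (2 * d) 1).foldl
                (fun top idx =>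
                  let digits := if idx < d
                    then (PySem.List.pyRange 0 d 1).map (fun c =>
                      PySem.List.pyGetD (PySem.List.pyGetD sopa (i + idx) []) (j + c) 0)
                    else (PySem.List.pyRange 0 d 1).map (fun r =>
                      PySem.List.pyGetD (PySem.List.pyGetD sopa (i + r) []) (j + idx - d) 0)
                  let v := (PySem.Int.ofStr? (PySem.Str.join "" (digits.map PySem.Int.toStr))).getD 0
                  let w := (PySem.Int.ofStr? ((PySem.Str.slice? (PySem.Int.toStr v) none none (-1)).getD "")).getD 0
                  let cands := (if PySem.Int.mod v 2 ≠ 0 then [v] else []) ++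
                               (if PySem.Int.mod w 2 ≠ 0 then [w] else [])
                  cands.foldl (fun t c => (insDesc c t).take 3) top)
                []
              top.foldl (fun best x => if best.contains x then best else (insDesc x best).take 3) best)
            best)
        []
      res ++ [best])
    []

-- ===== PRECONDITION & SPEC =====
-- Pre_ excludes exactly the inputs where the Python A raises: a row shorter than len(sopa)
-- (IndexError in to_matriz), or a negative entry in the first len(sopa) columns (int() then
-- raises ValueError on a string with an interior '-', or on the reversal of a negative number).
def Pre_encuentra_maximo (sopa : List (List Int)) : Prop :=
  ∀ fila ∈ sopa, sopa.length ≤ fila.length ∧ ∀ x ∈ fila.take sopa.length, 0 ≤ x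
instance (sopa : List (List Int)) : Decidable (Pre_encuentra_maximo sopa) := by
  unfold Pre_encuentra_maximo; infer_instance
def pvWitness_encuentra_maximo : List (List Int) := [[1, 2], [3, 4]]

def Spec_encuentra_maximo (sopa : List (List Int)) (out : List (List Int)) : Prop := out = encuentra_maximo_alt sopa
instance (sopa : List (List Int)) (out : List (List Int)) : Decidable (Spec_encuentra_maximo sopa out) := by unfold Spec_encuentra_maximo; infer_instance

-- ===== CLAIM (what is proved, stated in full; the proofs are below) =====
def Claim_equal_encuentra_maximo : Prop := ∀ (sopa : List (List Int)), Dom_encuentra_maximo sopa → Pre_encuentra_maximo sopa → Spec_encuentra_maximo sopa (encuentra_maximo sopa)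

-- ===== LEMMAS AND PROOFS =====

-- ---- quick_sort is a descending sort ----

lemma qs_split_perm (p : Int) (l : List Int) :
    ((l.filter (fun x => decide (p < x)) ++ l.filter (fun x => decide (x = p))) ++
      l.filter (fun x => decide (x < p))).Perm l := by
  induction l with
  | nil => simp
  | cons x t ih =>
    simp only [List.filter_cons]
    rcases lt_trichotomy x p with h | h | h
    · rw [if_neg (by simpa using not_lt.mpr (le_of_lt h)),
        if_neg (by simpa using ne_of_lt h), if_pos (by simpa using h)]
      exact List.perm_middle.trans (ih.cons x)
    · rw [if_neg (by simp [h]), if_pos (by simp [h]), if_neg (by simp [h])]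
      exact ((List.perm_middle.append_right _).trans (ih.cons x))
    · rw [if_pos (by simpa using h), if_neg (by simpa using (ne_of_lt h).symm),
        if_neg (by simpa using not_lt.mpr (le_of_lt h))]
      simp only [List.cons_append]
      exact ih.cons x

lemma quick_sort_perm_aux (m : Nat) : ∀ l : List Int, l.length ≤ m → (quick_sort l).Perm l := by
  induction m with
  | zero =>
    intro l hl
    have : l = [] := List.eq_nil_of_length_eq_zero (by omega)
    subst this; rw [quick_sort]; simp
  | succ m ih =>
    intro l hl
    rw [quick_sort]
    split_ifs with h
    · have hflt := qs_filter_lt (qs_pivot_mem l h)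
      simp only [qs_split_eq]
      exact (((ih _ (by omega)).append (List.Perm.refl _)).append (ih _ (by omega))).trans
        (qs_split_perm _ l)
    · exact List.Perm.refl l

lemma quick_sort_perm (l : List Int) : (quick_sort l).Perm l :=
  quick_sort_perm_aux l.length l le_rfl

lemma quick_sort_pairwise_aux (m : Nat) :
    ∀ l : List Int, l.length ≤ m → (quick_sort l).Pairwise (fun a b => b ≤ a) := by
  induction m with
  | zero =>
    intro l hl
    have : l = [] := List.eq_nil_of_length_eq_zero (by omega)
    subst this; rw [quick_sort]; simp
  | succ m ih =>
    intro l hl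
    rw [quick_sort]
    split_ifs with h
    · have hflt := qs_filter_lt (qs_pivot_mem l h)
      simp only [qs_split_eq]
      rw [List.pairwise_append, List.pairwise_append]
      refine ⟨⟨ih _ (by omega), ?_, ?_⟩, ih _ (by omega), ?_⟩
      · exact List.pairwise_of_forall_mem_list fun a ha b hb => by
          simp only [List.mem_filter, decide_eq_true_eq] at ha hb
          omega
      · intro a ha b hb
        have ha' := (quick_sort_perm _).mem_iff.mp ha
        simp only [List.mem_filter, decide_eq_true_eq] at ha' hb
        omega
      · intro a ha b hb
        have hb' := (quick_sort_perm _).mem_iff.mp hb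
        rcases List.mem_append.mp ha with ha' | ha' <;>
          [have ha'' := (quick_sort_perm _).mem_iff.mp ha'; have ha'' := ha'] <;>
          simp only [List.mem_filter, decide_eq_true_eq] at ha'' hb' <;> omega
    · rcases l with _ | ⟨a, _ | ⟨b, t⟩⟩
      · exact List.Pairwise.nil
      · simp
      · simp at h

lemma quick_sort_pairwise (l : List Int) : (quick_sort l).Pairwise (fun a b => b ≤ a) :=
  quick_sort_pairwise_aux l.length l le_rfl

-- descending sort, and 'top 3 of' — the common denominator of both programs
def sortedD (l : List Int) : List Int := PySem.List.sorted l (fun x => x) true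
def top3 (l : List Int) : List Int := (sortedD l).take 3

lemma sortedD_congr_perm {l l' : List Int} (h : l.Perm l') : sortedD l = sortedD l' :=
  List.Perm.eq_of_pairwise (fun a b _ _ h1 h2 => le_antisymm h2 h1)
    (PySem.List.sorted_pairwise_rev l (fun x => x))
    (PySem.List.sorted_pairwise_rev l' (fun x => x))
    ((PySem.List.sorted_perm l (fun x => x) true).trans
      (h.trans (PySem.List.sorted_perm l' (fun x => x) true).symm))

lemma quick_sort_eq (l : List Int) : quick_sort l = sortedD l := by
  exact List.Perm.eq_of_pairwise (fun a b _ _ h1 h2 => le_antisymm h2 h1)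
    (quick_sort_pairwise l) (PySem.List.sorted_pairwise_rev l (fun x => x))
    ((quick_sort_perm l).trans (PySem.List.sorted_perm l (fun x => x) true).symm)

lemma tres_maximos_eq (l : List Int) : tres_maximos l = l.take 3 := by
  unfold tres_maximos
  split_ifs with h
  · exact (List.take_of_length_le (by omega)).symm
  · rw [PySem.List.slice_zero_start]
    exact_mod_cast PySem.List.slice_to_natCast l 3

lemma tq_eq (l : List Int) : tres_maximos (quick_sort l) = top3 l := by
  rw [tres_maximos_eq, quick_sort_eq]; rfl

-- ---- the streaming bounded buffer equals sort-then-take-3 ----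

lemma insDesc_perm (x : Int) (l : List Int) : (insDesc x l).Perm (x :: l) := by
  induction l with
  | nil => rfl
  | cons a t ih =>
    simp only [insDesc]
    split_ifs with h
    · exact (ih.cons a).trans (List.Perm.swap x a t)
    · exact List.Perm.refl _

lemma insDesc_pairwise (x : Int) (l : List Int) (h : l.Pairwise (fun a b => b ≤ a)) :
    (insDesc x l).Pairwise (fun a b => b ≤ a) := by
  induction l with
  | nil => simp [insDesc]
  | cons a t ih =>
    rw [List.pairwise_cons] at h
    simp only [insDesc]
    split_ifs with hx
    · rw [List.pairwise_cons]
      refine ⟨fun y hy => ?_, ih h.2⟩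
      rcases List.mem_cons.mp ((insDesc_perm x t).mem_iff.mp hy) with rfl | hyt
      · exact hx
      · exact h.1 y hyt
    · rw [List.pairwise_cons, List.pairwise_cons]
      exact ⟨fun y hy => by
        rcases List.mem_cons.mp hy with rfl | hyt
        · omega
        · have := h.1 y hyt; omega,
        h.1, h.2⟩

lemma insDesc_sortedD (x : Int) (l : List Int) : insDesc x (sortedD l) = sortedD (x :: l) :=
  List.Perm.eq_of_pairwise (fun a b _ _ h1 h2 => le_antisymm h2 h1)
    (insDesc_pairwise x _ (PySem.List.sorted_pairwise_rev l (fun x => x)))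
    (PySem.List.sorted_pairwise_rev (x :: l) (fun x => x))
    ((insDesc_perm x _).trans
      (((PySem.List.sorted_perm l (fun x => x) true).cons x).trans
        (PySem.List.sorted_perm (x :: l) (fun x => x) true).symm))

lemma take_insDesc_take (k : Nat) (x : Int) (s : List Int) :
    (insDesc x (s.take k)).take k = (insDesc x s).take k := by
  induction s generalizing k with
  | nil => simp
  | cons a t ih =>
    cases k with
    | zero => simp
    | succ k =>
      simp only [List.take_succ_cons, insDesc]
      split_ifs with h
      · simp [List.take_succ_cons, ih k]
      · cases k with
        | zero => simp
        | succ m =>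
          simp only [List.take_succ_cons, List.take_take]
          rw [min_eq_left (by omega)]

lemma insDesc_of_all_le (x : Int) (l : List Int) (h : ∀ a ∈ l, x ≤ a) :
    insDesc x l = l ++ [x] := by
  induction l with
  | nil => rfl
  | cons a t ih =>
    simp only [insDesc, if_pos (h a List.mem_cons_self), List.cons_append]
    rw [ih (fun b hb => h b (List.mem_cons_of_mem a hb))]

lemma stream_top3 (l m : List Int) :
    l.foldl (fun t c => (insDesc c t).take 3) (top3 m) = top3 (m ++ l) := by
  induction l generalizing m with
  | nil => simp
  | cons x t ih =>
    rw [List.foldl_cons]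
    have hstep : (insDesc x (top3 m)).take 3 = top3 (m ++ [x]) := by
      unfold top3
      rw [take_insDesc_take, insDesc_sortedD,
        sortedD_congr_perm (List.perm_append_singleton x m).symm]
    rw [hstep, ih (m ++ [x]), List.append_assoc]
    rfl

lemma top3_nil : top3 [] = [] := rfl

-- ---- the distinct streaming buffer equals dedup-sort-take-3 ----

lemma ofList_append_singleton (m : List Int) (x : Int) :
    PySem.Set.ofList (m ++ [x]) = PySem.Set.add (PySem.Set.ofList m) x := by
  rw [PySem.Set.ofList_eq_foldl, PySem.Set.ofList_eq_foldl, List.foldl_append]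
  rfl

lemma dstream (l m : List Int) :
    l.foldl (fun best x => if best.contains x then best else (insDesc x best).take 3)
      (top3 (PySem.Set.ofList m))
    = top3 (PySem.Set.ofList (m ++ l)) := by
  induction l generalizing m with
  | nil => simp
  | cons x t ih =>
    rw [List.foldl_cons]
    have hstep : (if (top3 (PySem.Set.ofList m)).contains x then top3 (PySem.Set.ofList m)
          else (insDesc x (top3 (PySem.Set.ofList m))).take 3)
        = top3 (PySem.Set.ofList (m ++ [x])) := by
      rw [ofList_append_singleton]
      by_cases hm : x ∈ PySem.Set.ofList m
      · have hadd : PySem.Set.add (PySem.Set.ofList m) x = PySem.Set.ofList m := by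
          simp [PySem.Set.add, hm]
        rw [hadd]
        by_cases hb : x ∈ top3 (PySem.Set.ofList m)
        · rw [if_pos (by simpa using hb)]
        · rw [if_neg (by simpa using hb)]
          -- x is in the set but below its three largest elements: inserting and
          -- truncating leaves the buffer unchanged
          set s := sortedD (PySem.Set.ofList m) with hs
          have hxs : x ∈ s := by
            rw [hs]
            exact ((PySem.List.sorted_perm _ (fun x => x) true).mem_iff).mpr hm
          have hxd : x ∈ s.drop 3 := by
            rcases List.mem_append.mp ((List.take_append_drop 3 s).symm ▸ hxs) with h | h
            · exact absurd h hb
            · exact h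
          have hlen : (s.take 3).length = 3 := by
            have : 3 < s.length := by
              by_contra hc
              rw [List.drop_eq_nil_of_le (by omega)] at hxd
              exact absurd hxd (List.not_mem_nil)
            simp [List.length_take]
            omega
          have hcross : ∀ a ∈ s.take 3, x ≤ a := by
            intro a ha
            have hp : s.Pairwise (fun a b => b ≤ a) := by
              rw [hs]; exact PySem.List.sorted_pairwise_rev _ (fun x => x)
            rw [← List.take_append_drop 3 s, List.pairwise_append] at hp
            exact hp.2.2 a ha x hxd
          show (insDesc x (top3 (PySem.Set.ofList m))).take 3 = top3 (PySem.Set.ofList m)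
          unfold top3
          rw [← hs, insDesc_of_all_le x _ hcross]
          exact List.take_left' hlen
      · have hb : x ∉ top3 (PySem.Set.ofList m) := fun hx =>
          hm (((PySem.List.sorted_perm _ (fun x => x) true).mem_iff).mp (List.mem_of_mem_take hx))
        rw [if_neg (by simpa using hb)]
        have hadd : PySem.Set.add (PySem.Set.ofList m) x = PySem.Set.ofList m ++ [x] := by
          simp [PySem.Set.add, hm]
        rw [hadd]
        unfold top3
        rw [take_insDesc_take, insDesc_sortedD,
          sortedD_congr_perm (List.perm_append_singleton x (PySem.Set.ofList m)).symm]
    rw [hstep, ih (m ++ [x]), List.append_assoc]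
    rfl

-- ---- the per-block candidate list, shared by both reductions ----

def pvCand (v : Int) : List Int :=
  let w := (PySem.Int.ofStr? ((PySem.Str.slice? (PySem.Int.toStr v) none none (-1)).getD "")).getD 0
  (if PySem.Int.mod v 2 ≠ 0 then [v] else []) ++ (if PySem.Int.mod w 2 ≠ 0 then [w] else [])

def pvRowNum (sopa : List (List Int)) (i j d r : Int) : Int :=
  (PySem.Int.ofStr? (PySem.Str.join "" ((PySem.List.pyRange 0 d 1).map (fun c =>
    PySem.Int.toStr (PySem.List.pyGetD (PySem.List.pyGetD sopa (i + r) []) (j + c) 0))))).getD 0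

def pvColNum (sopa : List (List Int)) (i j d c : Int) : Int :=
  (PySem.Int.ofStr? (PySem.Str.join "" ((PySem.List.pyRange 0 d 1).map (fun r =>
    PySem.Int.toStr (PySem.List.pyGetD (PySem.List.pyGetD sopa (i + r) []) (j + c) 0))))).getD 0

def pvCands (sopa : List (List Int)) (i j d : Int) : List Int :=
  (PySem.List.pyRange 0 d 1).flatMap (fun r => pvCand (pvRowNum sopa i j d r)) ++
  (PySem.List.pyRange 0 d 1).flatMap (fun c => pvCand (pvColNum sopa i j d c))

lemma flatMap_pyRange_shift {b : Type} (g : Int → List b) (a d : Int) :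
    (PySem.List.pyRange a (a + d) 1).flatMap g
      = (PySem.List.pyRange 0 d 1).flatMap (fun k => g (a + k)) := by
  rw [PySem.List.pyRange_one a (a + d), PySem.List.pyRange_one 0 d,
    show a + d - a = d - 0 by ring]
  simp [List.flatMap_map]

lemma map_pyRange_shift {b : Type} (g : Int → b) (a d : Int) :
    (PySem.List.pyRange a (a + d) 1).map g = (PySem.List.pyRange 0 d 1).map (fun k => g (a + k)) := by
  rw [PySem.List.pyRange_one a (a + d), PySem.List.pyRange_one 0 d,
    show a + d - a = d - 0 by ring]
  simp [List.map_map, Function.comp_def]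

lemma pyRange_toNat (d : Int) :
    PySem.List.pyRange 0 ((d.toNat : Int)) 1 = PySem.List.pyRange 0 d 1 := by
  by_cases h : 0 ≤ d
  · rw [Int.toNat_of_nonneg h]
  · rw [PySem.List.pyRange_one_eq_nil (by omega), PySem.List.pyRange_one_eq_nil (by omega)]

lemma to_matriz_eq (lista : List (List Int)) (f c d : Int) :
    to_matriz lista f c d
      = (PySem.List.pyRange 0 d 1).map (fun r => (PySem.List.pyRange 0 d 1).map (fun cc =>
          PySem.List.pyGetD (PySem.List.pyGetD lista (f + r) []) (c + cc) 0)) := by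
  unfold to_matriz
  simp only [PySem.List.foldl_append_singleton_eq_map, List.nil_append, map_pyRange_shift]

lemma push_eq (acc : List Int) (v w : Int) (c1 c2 : Prop) [Decidable c1] [Decidable c2] :
    (if c2 then (if c1 then acc ++ [v] else acc) ++ [w] else (if c1 then acc ++ [v] else acc))
      = acc ++ ((if c1 then [v] else []) ++ (if c2 then [w] else [])) := by
  split_ifs <;> simp

lemma col_aux_eq (sopa : List (List Int)) (f c d j : Int) (hj0 : 0 ≤ j) (hjd : j < d) :
    (PySem.List.pyRange 0 d 1).map (fun i2 => PySem.List.pyGetD (PySem.List.pyGetD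
        ((PySem.List.pyRange 0 d 1).map (fun r => (PySem.List.pyRange 0 d 1).map (fun cc =>
          PySem.List.pyGetD (PySem.List.pyGetD sopa (f + r) []) (c + cc) 0))) i2 []) j 0)
      = (PySem.List.pyRange 0 d 1).map (fun r =>
          PySem.List.pyGetD (PySem.List.pyGetD sopa (f + r) []) (c + j) 0) := by
  refine List.map_congr_left fun i2 hi2 => ?_
  obtain ⟨h0, hd2⟩ := PySem.List.mem_pyRange_one.mp hi2
  rw [PySem.List.pyGetD_map_pyRange_of_nonneg _ _ _ _ h0 hd2]
  exact PySem.List.pyGetD_map_pyRange_of_nonneg _ _ _ _ hj0 hjd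

-- A's per-block work reduced to top-3 of the shared candidate list
lemma submax_eq (sopa : List (List Int)) (f c d : Int) :
    encuentra_submaximos (to_matriz sopa f c d) = tres_maximos (quick_sort (pvCands sopa f c d)) := by
  unfold encuentra_submaximos pvCands
  simp only [to_matriz_eq, List.length_map, PySem.List.length_pyRange_one, Int.sub_zero,
    pyRange_toNat, PySem.List.foldl_append_singleton_eq_map, List.nil_append]
  simp only [push_eq, PySem.List.foldl_append_eq_flatMap, List.nil_append]
  refine congrArg (fun l => tres_maximos (quick_sort l)) ?_
  refine congrArg₂ _ ?_ ?_
  · refine List.flatMap_congr fun r hr => ?_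
    obtain ⟨h0, hd⟩ := PySem.List.mem_pyRange_one.mp hr
    rw [PySem.List.pyGetD_map_pyRange_of_nonneg _ _ _ _ h0 hd]
    simp only [pvCand, pvRowNum, List.map_map, Function.comp_def]
  · refine List.flatMap_congr fun j hj => ?_
    obtain ⟨hj0, hjd⟩ := PySem.List.mem_pyRange_one.mp hj
    rw [col_aux_eq sopa f c d j hj0 hjd]
    simp only [pvCand, pvColNum, List.map_map, Function.comp_def]

-- ---- B's block loop reduced to top-3 of the same candidate list ----

lemma foldl_foldl_flatMap {α β γ : Type} (g : γ → β → γ) (f : α → List β) (l : List α) (init : γ) :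
    l.foldl (fun acc x => (f x).foldl g acc) init = (l.flatMap f).foldl g init := by
  induction l generalizing init with
  | nil => rfl
  | cons a t ih => simp [List.flatMap_cons, List.foldl_append, ih]

-- B's interleaved row/column index loop produces exactly the shared candidate list
lemma candList_eq (sopa : List (List Int)) (i j d : Int) :
    (PySem.List.pyRange 0 (2 * d) 1).flatMap (fun idx =>
      let digits := if idx < d
        then (PySem.List.pyRange 0 d 1).map (fun c =>
          PySem.List.pyGetD (PySem.List.pyGetD sopa (i + idx) []) (j + c) 0)
        else (PySem.List.pyRange 0 d 1).map (fun r =>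
          PySem.List.pyGetD (PySem.List.pyGetD sopa (i + r) []) (j + idx - d) 0)
      let v := (PySem.Int.ofStr? (PySem.Str.join "" (digits.map PySem.Int.toStr))).getD 0
      let w := (PySem.Int.ofStr? ((PySem.Str.slice? (PySem.Int.toStr v) none none (-1)).getD "")).getD 0
      (if PySem.Int.mod v 2 ≠ 0 then [v] else []) ++ (if PySem.Int.mod w 2 ≠ 0 then [w] else []))
    = pvCands sopa i j d := by
  by_cases hd : 0 ≤ d
  · rw [PySem.List.pyRange_one_append 0 d (2 * d) hd (by omega), List.flatMap_append]
    unfold pvCands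
    refine congrArg₂ _ ?_ ?_
    · refine List.flatMap_congr fun r hr => ?_
      obtain ⟨h0, hlt⟩ := PySem.List.mem_pyRange_one.mp hr
      simp only [if_pos hlt, pvCand, pvRowNum, List.map_map, Function.comp_def]
    · rw [show (2 * d) = d + d by ring, flatMap_pyRange_shift]
      refine List.flatMap_congr fun k hk => ?_
      obtain ⟨hk0, hkd⟩ := PySem.List.mem_pyRange_one.mp hk
      simp only [if_neg (by omega : ¬ (d + k < d)), show j + (d + k) - d = j + k by omega,
        pvCand, pvColNum, List.map_map, Function.comp_def]
  · rw [PySem.List.pyRange_one_eq_nil (by omega : 2 * d ≤ 0)]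
    unfold pvCands
    rw [PySem.List.pyRange_one_eq_nil (by omega : d ≤ 0)]
    rfl

lemma blockB_eq (sopa : List (List Int)) (i j d : Int) :
    (PySem.List.pyRange 0 (2 * d) 1).foldl
      (fun top idx =>
        let digits := if idx < d
          then (PySem.List.pyRange 0 d 1).map (fun c =>
            PySem.List.pyGetD (PySem.List.pyGetD sopa (i + idx) []) (j + c) 0)
          else (PySem.List.pyRange 0 d 1).map (fun r =>
            PySem.List.pyGetD (PySem.List.pyGetD sopa (i + r) []) (j + idx - d) 0)
        let v := (PySem.Int.ofStr? (PySem.Str.join "" (digits.map PySem.Int.toStr))).getD 0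
        let w := (PySem.Int.ofStr? ((PySem.Str.slice? (PySem.Int.toStr v) none none (-1)).getD "")).getD 0
        let cands := (if PySem.Int.mod v 2 ≠ 0 then [v] else []) ++
                     (if PySem.Int.mod w 2 ≠ 0 then [w] else [])
        cands.foldl (fun t c => (insDesc c t).take 3) top)
      []
    = top3 (pvCands sopa i j d) := by
  rw [foldl_foldl_flatMap, candList_eq]
  have := stream_top3 (pvCands sopa i j d) []
  rw [top3_nil] at this
  simpa using this

-- ===== VERDICT (by name: the statement is the Claim_ definition above) =====
theorem encuentra_maximo_spec : Claim_equal_encuentra_maximo := by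
  intro sopa _ _
  unfold Spec_encuentra_maximo
  simp only [encuentra_maximo, encuentra_maximo_alt]
  have e3 : PySem.List.pyRange 0 3 1 = [0, 1, 2] := by decide
  have e1 : PySem.List.pyRange 0 (0 + 1) 1 = [0] := by decide
  have e2 : PySem.List.pyRange 0 (1 + 1) 1 = [0, 1] := by decide
  have e3' : PySem.List.pyRange 0 (2 + 1) 1 = [0, 1, 2] := by decide
  simp only [e3, e1, e2, e3', List.foldl_cons, List.foldl_nil]
  simp only [submax_eq, tq_eq, blockB_eq]
  have h0 : ([] : List Int) = top3 (PySem.Set.ofList []) := rfl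
  rw [h0]
  simp only [dstream, List.nil_append]
  simp only [← h0, List.nil_append]
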